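-- pv_equiv track=rewrite | github.com/ivolvanov/vertex-cover | src/approximation.py | take2
-- ===== SOURCE A (Python) =====
-- import copy
--
-- def take2(adjacency_matrix):
--     adj_matrix = copy.deepcopy(adjacency_matrix)
--     cover = []
--     for i in range(len(adj_matrix)):
--         if 1 in adj_matrix[i]:
--             for y in range(len(adj_matrix)):
--                 if adj_matrix[i][y] == 1:
--                     cover.append(i)
--                     cover.append(y)
--
--                     for x in range(len(adj_matrix)):
--                         adj_matrix[i][x] = 0
--                         adj_matrix[x][i] = 0
--                         adj_matrix[y][x] = 0
--                         adj_matrix[x][y] = 0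
--
--     return cover
-- ===== SOURCE B (Python) =====
-- def take2(adjacency_matrix):
--     n = len(adjacency_matrix)
--     removed = set()
--     cover = []
--     for i in range(n):
--         if i in removed:
--             continue
--         for y, v in enumerate(adjacency_matrix[i][:n]):
--             if y not in removed and v == 1:
--                 cover.append(i)
--                 cover.append(y)
--                 removed.add(i)
--                 removed.add(y)
--                 break
--     return cover
-- ===== Notes on version B (the rewrite author's own statement) =====
-- stated objective: simpler
-- what changed: Replaces A's deepcopy-and-mutate mechanism (zeroing the picked row/column pair across the whole matrix after each pick and rescanning the mutated copy) with a 'removed' membership set consulted while reading the original matrix, breaking out of the row scan at the first live neighbour instead of relying on the zeroed row to silence the rest of the scan.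
-- outside the precondition, e.g. on take2([[0, 0, 0, 1], [2], [3, 3, 3]]): A returns [], B returns []
import Mathlib
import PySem

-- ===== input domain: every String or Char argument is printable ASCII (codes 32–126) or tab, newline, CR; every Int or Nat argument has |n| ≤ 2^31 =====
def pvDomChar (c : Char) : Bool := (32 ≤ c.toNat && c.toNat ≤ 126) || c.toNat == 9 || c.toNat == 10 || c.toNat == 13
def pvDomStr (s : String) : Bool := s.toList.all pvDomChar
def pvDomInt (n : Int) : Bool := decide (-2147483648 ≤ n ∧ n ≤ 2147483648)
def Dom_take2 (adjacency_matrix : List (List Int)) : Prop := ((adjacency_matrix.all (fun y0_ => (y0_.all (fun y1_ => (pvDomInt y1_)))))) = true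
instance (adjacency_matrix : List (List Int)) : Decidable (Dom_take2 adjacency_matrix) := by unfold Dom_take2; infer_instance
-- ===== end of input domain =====

-- B replaces A's deepcopy-and-zero-the-matrix mechanism with a `removed` membership set read
-- against the original, unmutated matrix, breaking at the first live neighbour (objective: simpler).

-- ===== PORT A =====
-- adj_matrix[r][c] read with default 0 and written via List.set/modify: exact on Pre_, where
-- every index A dereferences is in range.
def pvCell (m : List (List Int)) (r c : Nat) : Int := (m.getD r []).getD c 0

def pvSetCell (m : List (List Int)) (r c : Nat) : List (List Int) :=
  m.modify r (fun row => row.set c 0)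

-- the innermost x-loop: adj_matrix[i][x] = adj_matrix[x][i] = adj_matrix[y][x] = adj_matrix[x][y] = 0
def pvZero (n i y : Nat) (m : List (List Int)) : List (List Int) :=
  (List.range n).foldl (fun m x =>
    pvSetCell (pvSetCell (pvSetCell (pvSetCell m i x) x i) y x) x y) m

-- one step of the y-loop (A has no break: later iterations see the zeroed row)
def pvStepA (n i : Nat) (st : List (List Int) × List Int) (y : Nat) :
    List (List Int) × List Int :=
  if pvCell st.1 i y = 1 then (pvZero n i y st.1, st.2 ++ [(i : Int), (y : Int)]) else st

def take2 (adjacency_matrix : List (List Int)) : List Int :=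
  let n := adjacency_matrix.length
  ((List.range n).foldl (fun st i =>
      if (st.1.getD i []).contains 1 then (List.range n).foldl (pvStepA n i) st else st)
    (adjacency_matrix, [])).2

-- ===== PORT B =====
-- `for y, v in enumerate(adjacency_matrix[i][:n]): if y not in removed and v == 1: …; break`
def pvFindB (removed : PySem.Set Int) : List (Int × Int) → Option Int
  | [] => none
  | (y, v) :: ys =>
      if ¬ PySem.Set.contains removed y = true ∧ v = 1 then some y
      else pvFindB removed ys

def pvStepB (M : List (List Int)) (n : Nat) (st : PySem.Set Int × List Int) (i : Nat) :
    PySem.Set Int × List Int :=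
  if PySem.Set.contains st.1 (i : Int) then st
  else
    match pvFindB st.1
        (PySem.List.enumerate (PySem.List.slice (M.getD i []) none (some (n : Int))) 0) with
    | none => st
    | some y => ((st.1.add (i : Int)).add y, st.2 ++ [(i : Int), y])

def take2_alt (adjacency_matrix : List (List Int)) : List Int :=
  let n := adjacency_matrix.length
  ((List.range n).foldl (pvStepB adjacency_matrix n) (PySem.Set.empty, [])).2

-- ===== PRECONDITION & SPEC =====
-- Pre_ admits matrices with no entry 1 at all, or with every row at least as long as the matrix;
-- on the remaining ragged inputs A's scan-and-zero indexing usually raises IndexError mid-mutation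
-- (and where it happens to return, that is excluded only because no clean shape condition covers it).
def Pre_take2 (adjacency_matrix : List (List Int)) : Prop :=
  (∀ row ∈ adjacency_matrix, (1 : Int) ∉ row) ∨
  (∀ row ∈ adjacency_matrix, adjacency_matrix.length ≤ row.length)
instance (adjacency_matrix : List (List Int)) : Decidable (Pre_take2 adjacency_matrix) := by
  unfold Pre_take2; infer_instance

def pvWitness_take2 : List (List Int) := [[0, 1], [1, 0]]

def Spec_take2 (adjacency_matrix : List (List Int)) (out : List Int) : Prop := out = take2_alt adjacency_matrix
instance (adjacency_matrix : List (List Int)) (out : List Int) : Decidable (Spec_take2 adjacency_matrix out) := by unfold Spec_take2; infer_instance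

-- ===== CLAIM (what is proved, stated in full; the proofs are below) =====
def Claim_equal_take2 : Prop := ∀ (adjacency_matrix : List (List Int)), Dom_take2 adjacency_matrix → Pre_take2 adjacency_matrix → Spec_take2 adjacency_matrix (take2 adjacency_matrix)

-- ===== LEMMAS AND PROOFS =====

theorem length_setCell (m : List (List Int)) (r c : Nat) :
    (pvSetCell m r c).length = m.length := by
  simp [pvSetCell]

theorem rowlen_setCell (m : List (List Int)) (r c r' : Nat) :
    ((pvSetCell m r c).getD r' []).length = (m.getD r' []).length := by
  simp only [pvSetCell, List.getD_eq_getElem?_getD, List.getElem?_modify]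
  by_cases h : r = r' <;> cases hm : m[r']? <;> simp [h]

theorem cell_setCell (m : List (List Int)) (r c r' c' : Nat)
    (hc : c < (m.getD r []).length) :
    pvCell (pvSetCell m r c) r' c' = if r' = r ∧ c' = c then 0 else pvCell m r' c' := by
  simp only [pvCell, pvSetCell, List.getD_eq_getElem?_getD, List.getElem?_modify]
  by_cases h : r = r'
  · subst h
    simp only [List.getD_eq_getElem?_getD] at hc
    cases hm : m[r]? with
    | none => simp [hm] at hc
    | some row =>
      simp only [hm, Option.getD_some] at hc
      by_cases hcc : c = c'
      · subst hcc; simp [hc]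
      · simp [hcc, Ne.symm hcc]
  · simp [h, Ne.symm h]

theorem if_zero_or4 {P Q R S : Prop} [Decidable P] [Decidable Q] [Decidable R] [Decidable S]
    (a x : Int) :
    (if S then a else if R then a else if Q then a else if P then a else x)
      = if P ∨ Q ∨ R ∨ S then a else x := by
  split_ifs <;> tauto

theorem if_zero_or2 {P Q B : Prop} [Decidable P] [Decidable Q] [Decidable B]
    (h : B ↔ P ∨ Q) (a x : Int) :
    (if P then a else if Q then a else x) = if B then a else x := by
  split_ifs <;> tauto

theorem cons_cond_iff (r c i y x : Nat) (L : List Nat) :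
    ((r = i ∧ c ∈ x :: L) ∨ (c = i ∧ r ∈ x :: L) ∨ (r = y ∧ c ∈ x :: L) ∨ (c = y ∧ r ∈ x :: L))
    ↔ (((r = i ∧ c ∈ L) ∨ (c = i ∧ r ∈ L) ∨ (r = y ∧ c ∈ L) ∨ (c = y ∧ r ∈ L)) ∨
       ((r = i ∧ c = x) ∨ (r = x ∧ c = i) ∨ (r = y ∧ c = x) ∨ (r = x ∧ c = y))) := by
  simp only [List.mem_cons, and_or_left]
  constructor
  · rintro ((h|h)|(h|h)|(h|h)|(h|h)) <;> tauto
  · rintro ((h|h|h|h)|(h|h|h|h)) <;> tauto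

theorem zero_fold (n i y : Nat) (hi : i < n) (hy : y < n) :
    ∀ (L : List Nat) (m : List (List Int)),
    m.length = n → (∀ r, r < n → n ≤ (m.getD r []).length) → (∀ x ∈ L, x < n) →
    ((L.foldl (fun m x =>
        pvSetCell (pvSetCell (pvSetCell (pvSetCell m i x) x i) y x) x y) m).length = n ∧
     (∀ r, r < n → n ≤ ((L.foldl (fun m x =>
        pvSetCell (pvSetCell (pvSetCell (pvSetCell m i x) x i) y x) x y) m).getD r []).length) ∧
     (∀ r c, r < n → c < n →
       pvCell (L.foldl (fun m x =>
        pvSetCell (pvSetCell (pvSetCell (pvSetCell m i x) x i) y x) x y) m) r c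
         = if (r = i ∧ c ∈ L) ∨ (c = i ∧ r ∈ L) ∨ (r = y ∧ c ∈ L) ∨ (c = y ∧ r ∈ L)
           then 0 else pvCell m r c)) := by
  intro L
  induction L with
  | nil =>
      intro m hlen hrows _
      refine ⟨hlen, hrows, ?_⟩
      intro r c _ _; simp
  | cons x L IH =>
      intro m hlen hrows hL
      have hx : x < n := hL x (List.mem_cons_self ..)
      have hL' : ∀ z ∈ L, z < n := fun z hz => hL z (List.mem_cons_of_mem _ hz)
      obtain ⟨m1, hm1⟩ : ∃ m1, m1 = pvSetCell (pvSetCell (pvSetCell (pvSetCell m i x) x i) y x) x y := ⟨_, rfl⟩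
      have hlen1 : m1.length = n := by
        rw [hm1, length_setCell, length_setCell, length_setCell, length_setCell]; exact hlen
      have hrows1 : ∀ r, r < n → n ≤ (m1.getD r []).length := by
        intro r hr
        rw [hm1, rowlen_setCell, rowlen_setCell, rowlen_setCell, rowlen_setCell]
        exact hrows r hr
      have hcell1 : ∀ r c, r < n → c < n →
          pvCell m1 r c = if (r = i ∧ c = x) ∨ (r = x ∧ c = i) ∨ (r = y ∧ c = x) ∨ (r = x ∧ c = y)
            then 0 else pvCell m r c := by
        intro r c hr hc
        rw [hm1]
        rw [cell_setCell, cell_setCell, cell_setCell, cell_setCell]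
        · exact if_zero_or4 0 (pvCell m r c)
        · exact lt_of_lt_of_le hx (hrows i hi)
        · rw [rowlen_setCell]; exact lt_of_lt_of_le hi (hrows x hx)
        · rw [rowlen_setCell, rowlen_setCell]; exact lt_of_lt_of_le hx (hrows y hy)
        · rw [rowlen_setCell, rowlen_setCell, rowlen_setCell]; exact lt_of_lt_of_le hy (hrows x hx)
      have IH := IH m1 hlen1 hrows1 hL'
      simp only [List.foldl_cons, ← hm1]
      refine ⟨IH.1, IH.2.1, ?_⟩
      intro r c hr hc
      rw [IH.2.2 r c hr hc, hcell1 r c hr hc]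
      exact if_zero_or2 (cons_cond_iff r c i y x L) 0 (pvCell m r c)

theorem cell_pvZero (n i y : Nat) (m : List (List Int)) (hi : i < n) (hy : y < n)
    (hlen : m.length = n) (hrows : ∀ r, r < n → n ≤ (m.getD r []).length) :
    (pvZero n i y m).length = n ∧ (∀ r, r < n → n ≤ ((pvZero n i y m).getD r []).length) ∧
    (∀ r c, r < n → c < n →
      pvCell (pvZero n i y m) r c = if r = i ∨ c = i ∨ r = y ∨ c = y then 0 else pvCell m r c) := by
  have h := zero_fold n i y hi hy (List.range n) m hlen hrows (fun x hx => List.mem_range.mp hx)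
  rw [show (List.range n).foldl (fun m x =>
        pvSetCell (pvSetCell (pvSetCell (pvSetCell m i x) x i) y x) x y) m = pvZero n i y m from rfl] at h
  refine ⟨h.1, h.2.1, ?_⟩
  intro r c hr hc
  rw [h.2.2 r c hr hc]
  exact if_congr (by simp only [List.mem_range]; tauto) rfl rfl

-- proof-side Nat-indexed scanner mirroring the first-live-neighbour search
def pvScan (row : List Int) (R : PySem.Set Int) : List Nat → Option Nat
  | [] => none
  | y :: ys =>
      if ¬ PySem.Set.contains R (y : Int) = true ∧ row.getD y 0 = 1 then some y
      else pvScan row R ys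

theorem pvScan_none (row : List Int) (R : PySem.Set Int) :
    ∀ (L : List Nat), pvScan row R L = none ↔
      ∀ y ∈ L, ¬(¬ PySem.Set.contains R (y : Int) = true ∧ row.getD y 0 = 1)
  | [] => by simp [pvScan]
  | y :: L => by
      rw [pvScan]
      split_ifs with h
      · simp only [false_iff]
        intro hall; exact hall y (List.mem_cons_self ..) h
      · rw [pvScan_none row R L]
        constructor
        · intro hall z hz
          rcases List.mem_cons.mp hz with rfl | hz
          · exact h
          · exact hall z hz
        · intro hall z hz; exact hall z (List.mem_cons_of_mem _ hz)

theorem pvScan_some (row : List Int) (R : PySem.Set Int) :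
    ∀ (L : List Nat) (y0 : Nat), pvScan row R L = some y0 →
      y0 ∈ L ∧ ¬ PySem.Set.contains R (y0 : Int) = true ∧ row.getD y0 0 = 1
  | [] => by simp [pvScan]
  | y :: L => by
      intro y0 h
      rw [pvScan] at h
      split_ifs at h with hc
      · cases h; exact ⟨List.mem_cons_self .., hc⟩
      · have := pvScan_some row R L y0 h
        exact ⟨List.mem_cons_of_mem _ this.1, this.2⟩

-- B's enumerate-over-the-sliced-row search equals the Nat-indexed scan when the row is long enough
theorem findB_bridge (row : List Int) (R : PySem.Set Int) (n : Nat) (hn : n ≤ row.length) :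
    ∀ (d k : Nat), k + d = n →
    pvFindB R (PySem.List.enumerate ((row.take n).drop k) (k : Int))
      = Option.map (fun y : Nat => (y : Int)) (pvScan row R (List.range' k d))
  | 0, k, hk => by
      have : (row.take n).drop k = [] := by
        apply List.drop_eq_nil_of_le
        simp [min_eq_left hn]; omega
      rw [this]
      simp [PySem.List.enumerate, List.range', pvFindB, pvScan]
  | d + 1, k, hk => by
      have hkn : k < n := by omega
      have hkr : k < row.length := lt_of_lt_of_le hkn hn
      have hklen : k < (row.take n).length := by simp [min_eq_left hn]; omega
      rw [List.drop_eq_getElem_cons hklen, PySem.List.enumerate_cons,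
        List.getElem_take]
      have hrange : List.range' k (d + 1) = k :: List.range' (k + 1) d := List.range'_succ ..
      rw [hrange, pvFindB, pvScan]
      have hgetD : row.getD k 0 = row[k] := by
        rw [List.getD_eq_getElem?_getD, List.getElem?_eq_getElem hkr, Option.getD_some]
      rw [hgetD]
      split_ifs with h
      · rfl
      · have := findB_bridge row R n hn d (k + 1) (by omega)
        rw [show ((k : Int) + 1) = ((k + 1 : Nat) : Int) by push_cast; ring]
        exact this

theorem findB_no1 (R : PySem.Set Int) :
    ∀ (l : List Int) (k : Int), (∀ v ∈ l, v ≠ 1) →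
    pvFindB R (PySem.List.enumerate l k) = none
  | [], k, _ => by simp [PySem.List.enumerate, pvFindB]
  | v :: l, k, h => by
      rw [PySem.List.enumerate_cons, pvFindB,
        if_neg (fun hc => h v (List.mem_cons_self ..) hc.2)]
      exact findB_no1 R l (k + 1) (fun w hw => h w (List.mem_cons_of_mem _ hw))

theorem innerA_noop (n i : Nat) :
    ∀ (L : List Nat) (st : List (List Int) × List Int),
      (∀ y ∈ L, pvCell st.1 i y ≠ 1) → L.foldl (pvStepA n i) st = st
  | [], st, _ => rfl
  | y :: L, st, h => by
      rw [List.foldl_cons]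
      have hst : pvStepA n i st y = st := by
        rw [pvStepA, if_neg (h y (List.mem_cons_self ..))]
      rw [hst]
      exact innerA_noop n i L st (fun z hz => h z (List.mem_cons_of_mem _ hz))

theorem innerA_run (M m : List (List Int)) (R : PySem.Set Int) (cover : List Int) (n i : Nat)
    (hrows : ∀ r, r < n → n ≤ (m.getD r []).length)
    (hlen : m.length = n)
    (hcells : ∀ r c, r < n → c < n →
      pvCell m r c = if (r : Int) ∈ R ∨ (c : Int) ∈ R then 0 else pvCell M r c)
    (hi : i < n) (hiR : (i : Int) ∉ R) :
    ∀ (L : List Nat), (∀ y ∈ L, y < n) →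
    L.foldl (pvStepA n i) (m, cover) =
      (match pvScan (M.getD i []) R L with
       | none => (m, cover)
       | some y0 => (pvZero n i y0 m, cover ++ [(i : Int), (y0 : Int)]))
  | [], _ => rfl
  | y :: L, hL => by
      have hy : y < n := hL y (List.mem_cons_self ..)
      have hL' : ∀ z ∈ L, z < n := fun z hz => hL z (List.mem_cons_of_mem _ hz)
      have hcell : pvCell m i y = if (y : Int) ∈ R then 0 else pvCell M i y := by
        rw [hcells i y hi hy]
        by_cases hyR : (y : Int) ∈ R <;> simp [hyR, hiR]
      rw [List.foldl_cons, pvScan, pvStepA]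
      by_cases hyR : (y : Int) ∈ R
      · have hcont : PySem.Set.contains R (y : Int) = true := (PySem.Set.contains_iff R _).mpr hyR
        rw [if_neg (by rw [hcell, if_pos hyR]; decide), if_neg (fun h => h.1 hcont)]
        exact innerA_run M m R cover n i hrows hlen hcells hi hiR L hL'
      · have hcont : ¬ PySem.Set.contains R (y : Int) = true :=
          fun h => hyR ((PySem.Set.contains_iff R _).mp h)
        rw [hcell, if_neg hyR]
        by_cases hM : pvCell M i y = 1
        · rw [if_pos hM, if_pos ⟨hcont, hM⟩]
          exact innerA_noop n i L _ (by
            intro z hz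
            have h0 := (cell_pvZero n i y m hi hy hlen hrows).2.2 i z hi (hL' z hz)
            rw [h0, if_pos (Or.inl rfl)]; decide)
        · rw [if_neg hM, if_neg (fun h => hM h.2)]
          exact innerA_run M m R cover n i hrows hlen hcells hi hiR L hL'

theorem contains_of_cell (m : List (List Int)) (i c : Nat)
    (hc : c < (m.getD i []).length) (h1 : pvCell m i c = 1) :
    (m.getD i []).contains (1 : Int) = true := by
  rw [List.contains_iff_exists_mem_beq]
  rw [pvCell, List.getD_eq_getElem?_getD, List.getElem?_eq_getElem hc, Option.getD_some] at h1
  exact ⟨(m.getD i [])[c], List.getElem_mem hc, by rw [h1]; decide⟩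

def pvInv (M : List (List Int)) (n : Nat) (m : List (List Int)) (R : PySem.Set Int) : Prop :=
  m.length = n ∧ (∀ r, r < n → n ≤ (m.getD r []).length) ∧
  (∀ r c, r < n → c < n →
    pvCell m r c = if (r : Int) ∈ R ∨ (c : Int) ∈ R then 0 else pvCell M r c)

theorem outer_eq (M : List (List Int)) (n : Nat)
    (hlong : ∀ r, r < n → n ≤ (M.getD r []).length) :
    ∀ (L : List Nat), (∀ i ∈ L, i < n) →
    ∀ (m : List (List Int)) (R : PySem.Set Int) (cover : List Int),
    pvInv M n m R →
    (L.foldl (fun st i =>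
        if (st.1.getD i []).contains 1 then (List.range n).foldl (pvStepA n i) st else st)
      (m, cover)).2
    = (L.foldl (pvStepB M n) (R, cover)).2
  | [], _, m, R, cover, _ => rfl
  | i :: L, hL, m, R, cover, hInv => by
      have hi : i < n := hL i (List.mem_cons_self ..)
      have hL' : ∀ z ∈ L, z < n := fun z hz => hL z (List.mem_cons_of_mem _ hz)
      obtain ⟨hlen, hrows, hcells⟩ := hInv
      have hbridge : pvFindB R
          (PySem.List.enumerate (PySem.List.slice (M.getD i []) none (some ((n : Nat) : Int))) 0)
          = Option.map (fun y : Nat => (y : Int)) (pvScan (M.getD i []) R (List.range n)) := by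
        rw [PySem.List.slice_to_natCast]
        have := findB_bridge (M.getD i []) R n (hlong i hi) n 0 (by omega)
        rw [List.drop_zero] at this
        rw [show ((0 : Nat) : Int) = (0 : Int) from rfl] at this
        rw [this, List.range_eq_range']
      rw [List.foldl_cons, List.foldl_cons, pvStepB]
      by_cases hiR : (i : Int) ∈ R
      · have hstep : (if (m.getD i []).contains 1 then
              (List.range n).foldl (pvStepA n i) (m, cover) else (m, cover)) = (m, cover) := by
          split_ifs
          · exact innerA_noop n i (List.range n) (m, cover) (by
              intro y hy
              rw [hcells i y hi (List.mem_range.mp hy), if_pos (Or.inl hiR)]; decide)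
          · rfl
        rw [hstep, if_pos ((PySem.Set.contains_iff R _).mpr hiR)]
        exact outer_eq M n hlong L hL' m R cover ⟨hlen, hrows, hcells⟩
      · rw [if_neg (fun h => hiR ((PySem.Set.contains_iff R _).mp h))]
        cases hfind : pvScan (M.getD i []) R (List.range n) with
        | none =>
          have hstep : (if (m.getD i []).contains 1 then
              (List.range n).foldl (pvStepA n i) (m, cover) else (m, cover)) = (m, cover) := by
            split_ifs
            · rw [innerA_run M m R cover n i hrows hlen hcells hi hiR (List.range n)
                  (fun z hz => List.mem_range.mp hz), hfind]
            · rfl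
          rw [hstep, hbridge, hfind]
          exact outer_eq M n hlong L hL' m R cover ⟨hlen, hrows, hcells⟩
        | some y0 =>
          obtain ⟨hy0mem, hy0cont, hy0cell⟩ := pvScan_some (M.getD i []) R (List.range n) y0 hfind
          have hy0 : y0 < n := List.mem_range.mp hy0mem
          have hy0R : (y0 : Int) ∉ R := fun h => hy0cont ((PySem.Set.contains_iff R _).mpr h)
          have hguard : (m.getD i []).contains (1 : Int) = true := by
            refine contains_of_cell m i y0 (lt_of_lt_of_le hy0 (hrows i hi)) ?_
            rw [hcells i y0 hi hy0, if_neg (by tauto)]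
            exact hy0cell
          rw [if_pos hguard, hbridge, hfind]
          rw [innerA_run M m R cover n i hrows hlen hcells hi hiR (List.range n)
                (fun z hz => List.mem_range.mp hz), hfind]
          have hz := cell_pvZero n i y0 m hi hy0 hlen hrows
          refine outer_eq M n hlong L hL' _ _ _ ⟨hz.1, hz.2.1, ?_⟩
          intro r c hr hc
          rw [hz.2.2 r c hr hc, hcells r c hr hc]
          refine if_zero_or2 ?_ 0 (pvCell M r c)
          simp only [PySem.Set.mem_add, Nat.cast_inj]
          tauto

theorem outerA_no1 (n : Nat) :
    ∀ (L : List Nat) (m : List (List Int)) (cover : List Int),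
      (∀ i ∈ L, ¬ ((m.getD i []).contains (1 : Int) = true)) →
      (L.foldl (fun st i =>
          if (st.1.getD i []).contains 1 then (List.range n).foldl (pvStepA n i) st else st)
        (m, cover)) = (m, cover)
  | [], m, cover, _ => rfl
  | i :: L, m, cover, h => by
      rw [List.foldl_cons, if_neg (h i (List.mem_cons_self ..))]
      exact outerA_no1 n L m cover (fun z hz => h z (List.mem_cons_of_mem _ hz))

theorem outerB_no1 (M : List (List Int)) (n : Nat)
    (h1 : ∀ row ∈ M, (1 : Int) ∉ row) :
    ∀ (L : List Nat) (R : PySem.Set Int) (cover : List Int),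
      (L.foldl (pvStepB M n) (R, cover)) = (R, cover)
  | [], _, _ => rfl
  | i :: L, R, cover => by
      rw [List.foldl_cons, pvStepB]
      have hfind : pvFindB R
          (PySem.List.enumerate (PySem.List.slice (M.getD i []) none (some ((n : Nat) : Int))) 0)
          = none := by
        rw [PySem.List.slice_to_natCast]
        refine findB_no1 R _ 0 ?_
        intro v hv hv1
        have hvrow : v ∈ M.getD i [] := List.mem_of_mem_take hv
        cases hMi : M[i]? with
        | none => rw [List.getD_eq_getElem?_getD, hMi] at hvrow; simp at hvrow
        | some row =>
          rw [List.getD_eq_getElem?_getD, hMi, Option.getD_some] at hvrow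
          exact h1 row (List.mem_of_getElem? hMi) (hv1 ▸ hvrow)
      rw [hfind]
      have : (if PySem.Set.contains R (i : Int) = true then (R, cover)
          else match (none : Option Int) with
            | none => (R, cover)
            | some y => ((R.add (i : Int)).add y, cover ++ [(i : Int), y])) = (R, cover) := by
        split_ifs <;> rfl
      rw [this]
      exact outerB_no1 M n h1 L R cover

theorem take2_eq_alt (M : List (List Int)) (hPre : Pre_take2 M) :
    take2 M = take2_alt M := by
  cases hPre with
  | inl h1 =>
      show ((List.range M.length).foldl (fun st i =>
          if (st.1.getD i []).contains 1 then (List.range M.length).foldl (pvStepA M.length i) st else st)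
        (M, [])).2
        = ((List.range M.length).foldl (pvStepB M M.length) (PySem.Set.empty, [])).2
      rw [outerA_no1 M.length (List.range M.length) M [] ?_, outerB_no1 M M.length h1]
      intro i _
      rw [List.contains_iff_exists_mem_beq]
      rintro ⟨a, ha, hbeq⟩
      have haa : a = (1 : Int) := (eq_of_beq hbeq).symm
      subst haa
      cases hMi : M[i]? with
      | none => rw [List.getD_eq_getElem?_getD, hMi] at ha; simp at ha
      | some row =>
        rw [List.getD_eq_getElem?_getD, hMi, Option.getD_some] at ha
        exact h1 row (List.mem_of_getElem? hMi) ha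
  | inr hlong =>
      show ((List.range M.length).foldl (fun st i =>
          if (st.1.getD i []).contains 1 then (List.range M.length).foldl (pvStepA M.length i) st else st)
        (M, [])).2
        = ((List.range M.length).foldl (pvStepB M M.length) (PySem.Set.empty, [])).2
      have hlong' : ∀ r, r < M.length → M.length ≤ (M.getD r []).length := by
        intro r hr
        rw [List.getD_eq_getElem?_getD, List.getElem?_eq_getElem hr, Option.getD_some]
        exact hlong M[r] (List.getElem_mem hr)
      refine outer_eq M M.length hlong' (List.range M.length) (fun z hz => List.mem_range.mp hz)
        M PySem.Set.empty [] ⟨rfl, hlong', ?_⟩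
      intro r c _ _
      simp [PySem.Set.empty]

-- ===== VERDICT (by name: the statement is the Claim_ definition above) =====
theorem take2_spec : Claim_equal_take2 := by
  intro M _ hPre
  show take2 M = take2_alt M
  exact take2_eq_alt M hPre
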